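-- pv_equiv track=rewrite | github.com/thomy03/BUDGET-APP | backend/services/unified_classification_service.py | _infer_expense_type_from_tag
-- ===== SOURCE A (Python) =====
-- def _infer_expense_type_from_tag(tag: str) -> str:
--     """
--     Intelligent inference of FIXED/VARIABLE from contextual tags
--
--     This provides backward compatibility for systems expecting expense types
--     while prioritizing the more intelligent tag-based approach.
--     """
--     tag_lower = tag.lower()
--
--     # FIXED expense patterns (recurring, subscription-like)
--     fixed_patterns = [
--         'abonnement', 'streaming', 'telephone', 'internet', 'electricite', 'gaz', 'eau',
--         'assurance', 'banque', 'loyer', 'credit', 'pret', 'mutuelle', 'forfait'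
--     ]
--
--     # VARIABLE expense patterns (occasional, discretionary)
--     variable_patterns = [
--         'restaurant', 'courses', 'shopping', 'essence', 'transport', 'loisirs',
--         'voyage', 'sante', 'vetements', 'sport', 'beaute', 'divers'
--     ]
--
--     # Check for FIXED patterns
--     for pattern in fixed_patterns:
--         if pattern in tag_lower:
--             return "FIXED"
--
--     # Check for VARIABLE patterns
--     for pattern in variable_patterns:
--         if pattern in tag_lower:
--             return "VARIABLE"
--
--     # Default to VARIABLE for unknown tags
--     return "VARIABLE"
-- ===== SOURCE B (Python) =====
-- def _infer_expense_type_from_tag(tag: str) -> str: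
--     # Single left-to-right scan with a first-character index: instead of one
--     # substring search per pattern, walk the lowered tag once and, at each
--     # position, prefix-test only the patterns that can start with that char.
--     # (A match on A's VARIABLE list is indistinguishable from the default.)
--     fixed_patterns = [
--         'abonnement', 'streaming', 'telephone', 'internet', 'electricite', 'gaz', 'eau',
--         'assurance', 'banque', 'loyer', 'credit', 'pret', 'mutuelle', 'forfait'
--     ]
--     by_first = {}
--     for p in fixed_patterns:
--         by_first[p[0]] = by_first.get(p[0], []) + [p]
--     t = tag.lower()
--     for i in range(len(t)):
--         for p in by_first.get(t[i], []):
--             if t[i:].startswith(p):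
--                 return "FIXED"
--     return "VARIABLE"
-- ===== Notes on version B (the rewrite author's own statement) =====
-- stated objective: alternative
-- what changed: B replaces A's per-pattern substring searches (and its dead VARIABLE loop) with a first-character bucket index built once plus a single left-to-right position scan of the lowered tag, prefix-testing at each position only the patterns whose first character matches.
import Mathlib
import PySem

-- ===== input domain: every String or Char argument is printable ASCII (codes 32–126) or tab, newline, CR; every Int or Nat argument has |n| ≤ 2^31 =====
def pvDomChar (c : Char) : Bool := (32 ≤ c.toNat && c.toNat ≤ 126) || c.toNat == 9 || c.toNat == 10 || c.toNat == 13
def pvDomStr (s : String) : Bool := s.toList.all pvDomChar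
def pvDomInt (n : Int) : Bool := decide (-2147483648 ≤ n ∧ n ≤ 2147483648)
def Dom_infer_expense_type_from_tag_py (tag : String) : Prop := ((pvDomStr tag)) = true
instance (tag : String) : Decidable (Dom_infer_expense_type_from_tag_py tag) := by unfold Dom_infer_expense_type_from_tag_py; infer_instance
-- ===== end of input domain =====

-- B replaces per-pattern substring searches by a first-character bucket index plus one
-- left-to-right position scan of the lowered tag (objective: alternative); same return value.

-- ===== PORT A =====
def pvFixedPatterns : List String :=
  ["abonnement", "streaming", "telephone", "internet", "electricite", "gaz", "eau",
   "assurance", "banque", "loyer", "credit", "pret", "mutuelle", "forfait"]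

def pvVariablePatterns : List String :=
  ["restaurant", "courses", "shopping", "essence", "transport", "loisirs",
   "voyage", "sante", "vetements", "sport", "beaute", "divers"]

-- the second for-loop of A: first variable-pattern match returns "VARIABLE", else default "VARIABLE"
def pvScanVariable (pats : List String) (tagLower : String) : String :=
  match pats with
  | [] => "VARIABLE"
  | p :: rest => if PySem.Str.isIn p tagLower then "VARIABLE" else pvScanVariable rest tagLower

-- the first for-loop of A: first fixed-pattern match returns "FIXED", else fall through
def pvScanFixed (pats : List String) (tagLower : String) : String :=
  match pats with
  | [] => pvScanVariable pvVariablePatterns tagLower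
  | p :: rest => if PySem.Str.isIn p tagLower then "FIXED" else pvScanFixed rest tagLower

def infer_expense_type_from_tag_py (tag : String) : String :=
  pvScanFixed pvFixedPatterns (PySem.Str.lower tag)

-- ===== PORT B =====
-- by_first[p[0]] = by_first.get(p[0], []) + [p]   (patterns are nonempty literals; the [] branch is unreachable)
def pvAddBucket (d : PySem.Dict Char (List String)) (p : String) : PySem.Dict Char (List String) :=
  match p.toList with
  | [] => d
  | c :: _ => d.insert c (d.getD c [] ++ [p])

-- the position loop: at each suffix t[i:], prefix-test the patterns bucketed under t[i]
def pvScanPos (d : PySem.Dict Char (List String)) : List Char → String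
  | [] => "VARIABLE"
  | c :: rest =>
      if (d.getD c []).any (fun p => PySem.Chars.startswith (c :: rest) p.toList) then "FIXED"
      else pvScanPos d rest

def infer_expense_type_from_tag_py_alt (tag : String) : String :=
  let byFirst := pvFixedPatterns.foldl pvAddBucket PySem.Dict.empty
  pvScanPos byFirst (PySem.Str.lower tag).toList

-- ===== PRECONDITION & SPEC =====
def Spec_infer_expense_type_from_tag_py (tag : String) (out : String) : Prop := out = infer_expense_type_from_tag_py_alt tag
instance (tag : String) (out : String) : Decidable (Spec_infer_expense_type_from_tag_py tag out) := by unfold Spec_infer_expense_type_from_tag_py; infer_instance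

-- ===== CLAIM (what is proved, stated in full; the proofs are below) =====
def Claim_equal_infer_expense_type_from_tag_py : Prop := ∀ (tag : String), Dom_infer_expense_type_from_tag_py tag → Spec_infer_expense_type_from_tag_py tag (infer_expense_type_from_tag_py tag)

-- ===== LEMMAS AND PROOFS =====
theorem pvScanVariable_eq (pats : List String) (t : String) : pvScanVariable pats t = "VARIABLE" := by
  induction pats with
  | nil => rfl
  | cons p rest ih => simp [pvScanVariable, ih]

theorem pvScanFixed_eq (pats : List String) (t : String) :
    pvScanFixed pats t = if pats.any (fun p => PySem.Str.isIn p t) then "FIXED" else "VARIABLE" := by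
  induction pats with
  | nil => simp [pvScanFixed, pvScanVariable_eq]
  | cons p rest ih =>
    simp only [pvScanFixed, List.any_cons, Bool.or_eq_true, ih]
    by_cases h : PySem.Str.isIn p t = true <;>
      simp only [h, if_true, Bool.false_eq_true, if_false, true_or, false_or]

-- membership in a bucket of the folded index
theorem mem_bucket (pats : List String) (d : PySem.Dict Char (List String)) (c : Char) (q : String) :
    q ∈ (pats.foldl pvAddBucket d).getD c [] ↔
      q ∈ d.getD c [] ∨ (q ∈ pats ∧ q.toList.head? = some c) := by
  induction pats generalizing d with
  | nil => simp
  | cons p rest ih =>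
    rw [List.foldl_cons, ih]
    unfold pvAddBucket
    cases hp : p.toList with
    | nil =>
      have himp : q = p → ¬ (q.toList.head? = some c) := by
        intro e h; rw [e, hp] at h; simp at h
      simp only [List.mem_cons]
      tauto
    | cons c0 cs =>
      have hph : p.toList.head? = some c0 := by rw [hp]; rfl
      rw [PySem.Dict.getD_insert]
      by_cases hc0 : c = c0
      · subst hc0
        have himp : q = p → q.toList.head? = some c := by intro e; rw [e]; exact hph
        simp only [if_pos trivial, List.mem_append, List.mem_cons]
        tauto
      · have himp : q = p → ¬ (q.toList.head? = some c) := by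
          intro e h; rw [e, hph] at h; exact hc0 (Option.some.inj h).symm
        simp only [if_neg hc0, List.mem_cons]
        tauto

-- at one position, the bucket test equals "some pattern is a prefix here"
theorem bucket_test (pats : List String) (hne : ∀ p ∈ pats, p.toList ≠ [])
    (c : Char) (rest : List Char) :
    ((pats.foldl pvAddBucket PySem.Dict.empty).getD c []).any
        (fun p => PySem.Chars.startswith (c :: rest) p.toList)
      = pats.any (fun p => PySem.Chars.startswith (c :: rest) p.toList) := by
  rcases h : pats.any (fun p => PySem.Chars.startswith (c :: rest) p.toList) with _ | _
  · rw [List.any_eq_false] at h ⊢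
    intro p hp
    rw [mem_bucket] at hp
    rcases hp with h0 | ⟨hmem, _⟩
    · simp [PySem.Dict.getD_empty] at h0
    · exact h p hmem
  · rw [List.any_eq_true] at h ⊢
    obtain ⟨p, hp, hsw⟩ := h
    refine ⟨p, ?_, hsw⟩
    rw [mem_bucket]
    refine Or.inr ⟨hp, ?_⟩
    rw [PySem.Chars.startswith_iff] at hsw
    cases hq : p.toList with
    | nil => exact absurd hq (hne p hp)
    | cons q0 qs =>
      rw [hq] at hsw
      have hq0 : q0 = c := by
        obtain ⟨t, ht⟩ := hsw
        simpa using congrArg List.head? ht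
      simp [hq0]

-- infix in a cons decomposes into "prefix here" or "infix of the tail"
theorem isIn_cons (sub : List Char) (c : Char) (rest : List Char) :
    PySem.Chars.isIn sub (c :: rest)
      = (PySem.Chars.startswith (c :: rest) sub || PySem.Chars.isIn sub rest) := by
  rw [Bool.eq_iff_iff]
  simp only [Bool.or_eq_true, PySem.Chars.isIn_iff_infix, PySem.Chars.startswith_iff]
  exact List.infix_cons_iff

-- the position scan computes the same Bool as A's per-pattern substring search
theorem pvScanPos_eq (pats : List String) (hne : ∀ p ∈ pats, p.toList ≠ []) (l : List Char) :
    pvScanPos (pats.foldl pvAddBucket PySem.Dict.empty) l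
      = if pats.any (fun p => PySem.Chars.isIn p.toList l) then "FIXED" else "VARIABLE" := by
  induction l with
  | nil =>
    have hfalse : pats.any (fun p => PySem.Chars.isIn p.toList []) = false := by
      rw [List.any_eq_false]
      intro p hp
      rw [PySem.Chars.isIn_iff_infix]
      intro hinf
      exact hne p hp (List.infix_nil.mp hinf)
    simp [pvScanPos, hfalse]
  | cons c rest ih =>
    rw [pvScanPos, bucket_test pats hne, ih]
    have hsplit : pats.any (fun p => PySem.Chars.isIn p.toList (c :: rest))
        = (pats.any (fun p => PySem.Chars.startswith (c :: rest) p.toList)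
            || pats.any (fun p => PySem.Chars.isIn p.toList rest)) := by
      rw [Bool.eq_iff_iff]
      simp only [List.any_eq_true, Bool.or_eq_true]
      constructor
      · rintro ⟨p, hp, h⟩
        rw [isIn_cons, Bool.or_eq_true] at h
        rcases h with h | h
        · exact Or.inl ⟨p, hp, h⟩
        · exact Or.inr ⟨p, hp, h⟩
      · rintro (⟨p, hp, h⟩ | ⟨p, hp, h⟩)
        · exact ⟨p, hp, by rw [isIn_cons, Bool.or_eq_true]; exact Or.inl h⟩
        · exact ⟨p, hp, by rw [isIn_cons, Bool.or_eq_true]; exact Or.inr h⟩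
    rw [hsplit]
    by_cases h1 : pats.any (fun p => PySem.Chars.startswith (c :: rest) p.toList) = true
    · simp [h1]
    · rw [Bool.not_eq_true] at h1
      simp [h1]

-- ===== VERDICT (by name: the statement is the Claim_ definition above) =====
theorem infer_expense_type_from_tag_py_spec : Claim_equal_infer_expense_type_from_tag_py := by
  intro tag _
  unfold Spec_infer_expense_type_from_tag_py infer_expense_type_from_tag_py infer_expense_type_from_tag_py_alt
  rw [pvScanFixed_eq, pvScanPos_eq pvFixedPatterns (by decide)]
  simp only [PySem.Str.isIn_eq]
  rfl
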